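-- pv_equiv track=rewrite | github.com/Ricon-Q/QM-Method-RD | RD.py | PI_sort
-- ===== SOURCE A (Python) =====
-- def PI_sort(PI):
--     dic = {}
--     result = []
--     for i in PI:
--         tmp = i
--         tmp_replace = tmp.replace('-', '2')
--         dic[tmp_replace] = tmp
--
--     dic = sorted(dic.items())
--     for i in dic:
--         result.append(i[1])
--     return result
-- ===== SOURCE B (Python) =====
-- def PI_sort(PI):
--     pairs = [(x.replace('-', '2'), x) for x in PI]
--     pairs.sort(key=lambda p: p[0])
--     result = []
--     for i, p in enumerate(pairs):
--         if i + 1 == len(pairs) or p[0] != pairs[i + 1][0]: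
--             result.append(p[1])
--     return result
-- ===== Notes on version B (the rewrite author's own statement) =====
-- stated objective: alternative
-- what changed: Replaces A's dict-overwrite (keep-last per replaced key) followed by sorting the dict items with a single stable sort of (key, value) pairs and one linear pass that keeps the last element of each equal-key run; no dict is built.
import Mathlib
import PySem

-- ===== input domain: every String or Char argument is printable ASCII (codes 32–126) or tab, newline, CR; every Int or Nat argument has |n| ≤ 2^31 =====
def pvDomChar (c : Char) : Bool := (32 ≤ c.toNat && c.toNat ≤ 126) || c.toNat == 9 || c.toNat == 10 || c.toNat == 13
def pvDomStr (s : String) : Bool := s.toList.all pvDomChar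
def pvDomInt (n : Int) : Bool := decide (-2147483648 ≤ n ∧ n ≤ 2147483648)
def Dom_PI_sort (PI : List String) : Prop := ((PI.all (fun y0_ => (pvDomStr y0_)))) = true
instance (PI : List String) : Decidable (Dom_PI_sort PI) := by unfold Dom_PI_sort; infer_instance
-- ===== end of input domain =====

-- B replaces A's dict-overwrite-then-sort with one stable sort of (replaced key, value)
-- pairs plus a linear keep-last-of-each-run pass; same return value, no dict (objective: alternative).

-- ===== PORT A =====
def PI_sort (PI : List String) : List String :=
  let dic : PySem.Dict String String :=
    PI.foldl (fun dic i =>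
      let tmp := i
      let tmp_replace := PySem.Str.replace tmp "-" "2"
      dic.insert tmp_replace tmp) PySem.Dict.empty
  let dic2 := PySem.List.sorted2 dic.items (fun p => p.1) (fun p => p.2) false
  dic2.foldl (fun result i => result ++ [i.2]) []

-- ===== PORT B =====
-- the dedup pass of Source B: keep an element iff it is last, or the next key differs
def pvKeepLast : List (String × String) → List String
  | [] => []
  | [p] => [p.2]
  | p :: q :: t => if p.1 ≠ q.1 then p.2 :: pvKeepLast (q :: t) else pvKeepLast (q :: t)

def PI_sort_alt (PI : List String) : List String :=
  let pairs := PI.map (fun x => (PySem.Str.replace x "-" "2", x))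
  pvKeepLast (PySem.List.sorted pairs (fun p => p.1) false)

-- ===== PRECONDITION & SPEC =====
def Spec_PI_sort (PI : List String) (out : List String) : Prop := out = PI_sort_alt PI
instance (PI : List String) (out : List String) : Decidable (Spec_PI_sort PI out) := by unfold Spec_PI_sort; infer_instance

-- ===== CLAIM (what is proved, stated in full; the proofs are below) =====
def Claim_equal_PI_sort : Prop := ∀ (PI : List String), Dom_PI_sort PI → Spec_PI_sort PI (PI_sort PI)

-- ===== LEMMAS AND PROOFS =====

-- keep the last pair of each run of equal keys
def pvRunsLast : List (String × String) → List (String × String)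
  | [] => []
  | [p] => [p]
  | p :: q :: t => if p.1 ≠ q.1 then p :: pvRunsLast (q :: t) else pvRunsLast (q :: t)

theorem pvKeepLast_eq_map (l : List (String × String)) :
    pvKeepLast l = (pvRunsLast l).map (·.2) := by
  fun_induction pvRunsLast l <;> simp_all [pvKeepLast]

theorem pvFoldl_append (l : List (String × String)) (acc : List String) :
    l.foldl (fun r i => r ++ [i.2]) acc = acc ++ l.map (·.2) := by
  induction l generalizing acc <;> simp_all [List.foldl]

theorem pvMem_runsLast {a : String × String} {l : List (String × String)}
    (h : a ∈ pvRunsLast l) : a ∈ l := by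
  fun_induction pvRunsLast l with
  | case1 => simp_all
  | case2 p => simp_all
  | case3 p q t hne ih => simp_all; tauto
  | case4 p q t hne ih => simp_all

theorem pvRunsLast_pairwise {l : List (String × String)}
    (h : l.Pairwise (fun a b => a.1 ≤ b.1)) :
    (pvRunsLast l).Pairwise (fun a b => a.1 < b.1) := by
  fun_induction pvRunsLast l with
  | case1 => simp
  | case2 p => simp
  | case3 p q t hne ih =>
    rw [List.pairwise_cons] at h ⊢
    refine ⟨?_, ih h.2⟩
    intro b hb
    rcases List.mem_cons.mp (pvMem_runsLast hb) with rfl | hbt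
    · exact lt_of_le_of_ne (h.1 _ (by simp)) hne
    · exact lt_of_lt_of_le (lt_of_le_of_ne (h.1 _ (by simp)) hne)
        ((List.pairwise_cons.mp h.2).1 _ hbt)
  | case4 p q t hne ih =>
    rw [List.pairwise_cons] at h
    exact ih h.2

theorem pvRunsLast_mem_iff {l : List (String × String)} (h : l.Pairwise (fun a b => a.1 ≤ b.1))
    (k : String) (v : String) :
    (k, v) ∈ pvRunsLast l ↔ (l.filter (fun p => p.1 == k)).getLast? = some (k, v) := by
  fun_induction pvRunsLast l with
  | case1 => simp
  | case2 p =>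
    by_cases hk : (p.1 == k) = true
    · rw [List.filter_cons_of_pos (p := fun q : String × String => q.1 == k) hk]
      simp [eq_comm]
    · rw [List.filter_cons_of_neg (p := fun q : String × String => q.1 == k) hk]
      simp only [List.filter_nil, List.getLast?_nil, List.mem_singleton]
      constructor
      · rintro rfl; simp at hk
      · intro h'; simp at h'
  | case3 p q t hne ih =>
    rw [List.pairwise_cons] at h
    by_cases hk : p.1 = k
    · have hq : p.1 < q.1 := lt_of_le_of_ne (h.1 _ (by simp)) hne
      have hfe : ((q :: t).filter (fun p => p.1 == k)) = [] := by
        rw [List.filter_eq_nil_iff]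
        intro b hb
        have hblt : k < b.1 := by
          rcases List.mem_cons.mp hb with rfl | hbt
          · rw [← hk]; exact hq
          · calc k = p.1 := hk.symm
              _ < q.1 := hq
              _ ≤ b.1 := (List.pairwise_cons.mp h.2).1 _ hbt
        simp; exact ne_of_gt hblt
      have hpc : (p :: q :: t).filter (fun p => p.1 == k) =
          p :: (q :: t).filter (fun p => p.1 == k) := List.filter_cons_of_pos (by simp [hk])
      rw [List.mem_cons, ih h.2, hpc, hfe]
      simp [eq_comm]
    · have hpc : (p :: q :: t).filter (fun p => p.1 == k) =
          (q :: t).filter (fun p => p.1 == k) := List.filter_cons_of_neg (by simp [hk])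
      rw [List.mem_cons, ih h.2, hpc]
      have hnp : ¬((k, v) = p) := fun he => hk (by rw [← he])
      simp [hnp]
  | case4 p q t hne ih =>
    rw [List.pairwise_cons] at h
    have heq : p.1 = q.1 := by simpa using hne
    by_cases hk : p.1 = k
    · have hqk : (q.1 == k) = true := by simp [← heq, hk]
      have h2 : (q :: t).filter (fun p => p.1 == k) =
          q :: t.filter (fun p => p.1 == k) := List.filter_cons_of_pos hqk
      have h1 : (p :: q :: t).filter (fun p => p.1 == k) =
          p :: q :: t.filter (fun p => p.1 == k) := by
        rw [List.filter_cons_of_pos (by simp [hk]), h2]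
      rw [ih h.2, h1, h2, List.getLast?_cons_cons]
    · have hqk : ¬((q.1 == k) = true) := by simp [← heq, hk]
      have h1 : (p :: q :: t).filter (fun p => p.1 == k) =
          (q :: t).filter (fun p => p.1 == k) := List.filter_cons_of_neg (by simp [hk])
      rw [ih h.2, h1]

-- before-relation used by both sorts on the first component
def pvBef (a b : String × String) : Bool := decide (a.1 < b.1)

theorem pvInsertBy_pairwise {x : String × String} {acc : List (String × String)}
    (h : acc.Pairwise (fun a b => a.1 ≤ b.1)) :
    (PySem.List.insertBy pvBef x acc).Pairwise (fun a b => a.1 ≤ b.1) := by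
  induction acc with
  | nil => simp [PySem.List.insertBy]
  | cons y ys ih =>
    rw [List.pairwise_cons] at h
    by_cases hb : pvBef x y = true
    · simp only [PySem.List.insertBy, hb, if_true]
      have hxy : x.1 ≤ y.1 := le_of_lt (by simpa [pvBef] using hb)
      refine List.pairwise_cons.mpr ⟨?_, List.pairwise_cons.mpr ⟨h.1, h.2⟩⟩
      intro b hb'
      rcases List.mem_cons.mp hb' with rfl | hbt
      · exact hxy
      · exact le_trans hxy (h.1 _ hbt)
    · simp only [PySem.List.insertBy, hb, Bool.false_eq_true, if_false]
      have hyx : y.1 ≤ x.1 := le_of_not_gt (by simpa [pvBef] using hb)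
      refine List.pairwise_cons.mpr ⟨?_, ih h.2⟩
      intro b hb'
      rcases (PySem.List.mem_insertBy _ _ _ _).mp hb' with rfl | hbt
      · exact hyx
      · exact h.1 _ hbt

theorem pvInsertBy_filter (x : String × String) (acc : List (String × String))
    (h : acc.Pairwise (fun a b => a.1 ≤ b.1)) (k : String) :
    (PySem.List.insertBy pvBef x acc).filter (fun p => p.1 == k) =
      acc.filter (fun p => p.1 == k) ++ (if x.1 == k then [x] else []) := by
  induction acc with
  | nil =>
    simp [PySem.List.insertBy, List.filter_cons]
  | cons y ys ih =>
    rw [List.pairwise_cons] at h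
    by_cases hb : pvBef x y = true
    · simp only [PySem.List.insertBy, hb, if_true]
      have hxy : x.1 < y.1 := by simpa [pvBef] using hb
      by_cases hxk : x.1 = k
      · -- every element of y :: ys has key > x.1 = k, so the old filter is empty
        have hfe : ((y :: ys).filter (fun p => p.1 == k)) = [] := by
          rw [List.filter_eq_nil_iff]
          intro b hb'
          have : x.1 < b.1 := by
            rcases List.mem_cons.mp hb' with rfl | hbt
            · exact hxy
            · exact lt_of_lt_of_le hxy (h.1 _ hbt)
          simp; rw [← hxk]; exact ne_of_gt this
        rw [List.filter_cons, if_pos (by simp [hxk]), hfe]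
        simp [hxk]
      · rw [List.filter_cons, if_neg (by simp [hxk]), if_neg (by simp [hxk])]
        simp
    · simp only [PySem.List.insertBy, hb, Bool.false_eq_true, if_false]
      rw [List.filter_cons, List.filter_cons, ih h.2]
      by_cases hyk : (y.1 == k) = true
      · rw [if_pos hyk, if_pos hyk]; simp
      · rw [if_neg hyk, if_neg hyk]

theorem pvFoldl_insertBy_filter (l : List (String × String)) (acc : List (String × String))
    (h : acc.Pairwise (fun a b => a.1 ≤ b.1)) (k : String) :
    (l.foldl (fun acc x => PySem.List.insertBy pvBef x acc) acc).filter (fun p => p.1 == k) =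
      acc.filter (fun p => p.1 == k) ++ l.filter (fun p => p.1 == k) := by
  induction l generalizing acc with
  | nil => simp
  | cons x t ih =>
    simp only [List.foldl_cons]
    rw [ih _ (pvInsertBy_pairwise h), pvInsertBy_filter x acc h k, List.filter_cons]
    by_cases hxk : (x.1 == k) = true
    · rw [if_pos hxk, if_pos hxk]; simp
    · rw [if_neg hxk, if_neg hxk]; simp

theorem pvInsertBy_congr (f g : (String × String) → (String × String) → Bool)
    (x : String × String) (acc : List (String × String))
    (h : ∀ b ∈ acc, f x b = g x b) :
    PySem.List.insertBy f x acc = PySem.List.insertBy g x acc := by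
  induction acc with
  | nil => rfl
  | cons y ys ih =>
    simp only [PySem.List.insertBy]
    rw [h y (by simp)]
    by_cases hg : g x y = true
    · rw [if_pos hg, if_pos hg]
    · rw [if_neg hg, if_neg hg, ih (fun b hb => h b (by simp [hb]))]

theorem pvFoldl_insertBy_congr (f g : (String × String) → (String × String) → Bool)
    (l acc : List (String × String))
    (h1 : ∀ x ∈ l, ∀ b ∈ acc, f x b = g x b)
    (h2 : ∀ x ∈ l, ∀ y ∈ l, f x y = g x y) :
    l.foldl (fun acc x => PySem.List.insertBy f x acc) acc =
      l.foldl (fun acc x => PySem.List.insertBy g x acc) acc := by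
  induction l generalizing acc with
  | nil => rfl
  | cons x t ih =>
    simp only [List.foldl_cons]
    rw [pvInsertBy_congr f g x acc (h1 x (by simp))]
    apply ih
    · intro y hy b hb
      rcases (PySem.List.mem_insertBy _ _ _ _).mp hb with rfl | hbt
      · exact h2 y (by simp [hy]) b (by simp)
      · exact h1 y (by simp [hy]) b hbt
    · intro y hy z hz
      exact h2 y (by simp [hy]) z (by simp [hz])

theorem pvFind?_eq_head?_filter (p : String → Bool) (l : List String) :
    l.find? p = (l.filter p).head? := by
  induction l with
  | nil => rfl
  | cons x t ih =>
    by_cases hx : p x = true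
    · rw [List.find?_cons_of_pos hx, List.filter_cons_of_pos hx, List.head?_cons]
    · rw [List.find?_cons_of_neg hx, List.filter_cons_of_neg hx, ih]

theorem pvDict_get (l : List String) (d : PySem.Dict String String) (k : String) :
    (l.foldl (fun d i => d.insert (PySem.Str.replace i "-" "2") i) d).get? k =
      match l.reverse.find? (fun x => PySem.Str.replace x "-" "2" == k) with
      | some x => some x
      | none => d.get? k := by
  induction l using List.reverseRecOn generalizing d with
  | nil => rfl
  | append_singleton t x ih =>
    rw [List.foldl_append, List.reverse_append]
    simp only [List.foldl_cons, List.foldl_nil, List.reverse_singleton, List.singleton_append]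
    by_cases hx : (PySem.Str.replace x "-" "2" == k) = true
    · have hk : PySem.Str.replace x "-" "2" = k := eq_of_beq hx
      subst hk
      rw [PySem.Dict.get?_insert_self,
        List.find?_cons_of_pos (p := fun y : String => PySem.Str.replace y "-" "2" == PySem.Str.replace x "-" "2") (by simp)]
    · have hk : k ≠ PySem.Str.replace x "-" "2" := fun he => hx (by simp [he])
      rw [PySem.Dict.get?_insert_of_ne _ _ hk, ih d, List.find?_cons_of_neg (p := fun y : String => PySem.Str.replace y "-" "2" == k) hx]

theorem pvNodup_runsLast {l : List (String × String)}
    (h : l.Pairwise (fun a b => a.1 ≤ b.1)) : (pvRunsLast l).Nodup := by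
  have := pvRunsLast_pairwise h
  exact this.imp (fun hab => by intro he; rw [he] at hab; exact lt_irrefl _ hab)

-- main assembly
theorem pvMain (PI : List String) : PI_sort PI = PI_sort_alt PI := by
  -- names
  set d : PySem.Dict String String :=
    PI.foldl (fun dic i => dic.insert (PySem.Str.replace i "-" "2") i) PySem.Dict.empty with hd
  set pairs : List (String × String) := PI.map (fun x => (PySem.Str.replace x "-" "2", x)) with hpairs
  set L := PySem.List.sorted pairs (fun p => p.1) false with hL
  -- facts about the dict
  have hkeysNodup : d.keys.Nodup := by
    rw [hd]
    exact PySem.Dict.nodup_keys_foldl_insert_key PI (fun i => PySem.Str.replace i "-" "2")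
      (fun _ i => i) PySem.Dict.empty (by simp [PySem.Dict.keys_empty])
  have hitemsFstNodup : (d.items.map (·.1)).Nodup := hkeysNodup
  have hitemsNodup : d.items.Nodup := List.Nodup.of_map _ hitemsFstNodup
  -- L is sorted by key
  have hLpair : L.Pairwise (fun a b : String × String => a.1 ≤ b.1) :=
    PySem.List.sorted_pairwise pairs (fun p => p.1)
  -- stability: L and pairs agree on every key-filter
  have hstab : ∀ k, L.filter (fun p => p.1 == k) = pairs.filter (fun p => p.1 == k) := by
    intro k
    rw [hL, PySem.List.sorted_eq_foldl_insertBy]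
    have : (fun (acc : List (String × String)) (x : String × String) =>
        PySem.List.insertBy (fun a b => decide (a.1 < b.1)) x acc) =
        (fun acc x => PySem.List.insertBy pvBef x acc) := rfl
    rw [this, pvFoldl_insertBy_filter pairs [] (by simp) k]
    simp
  -- membership characterisation, both sides
  have hget : ∀ k, d.get? k =
      (PI.filter (fun x => (PySem.Str.replace x "-" "2") == k)).getLast? := by
    intro k
    rw [hd, pvDict_get PI PySem.Dict.empty k]
    rw [show PI.reverse.find? (fun x => (PySem.Str.replace x "-" "2") == k) =
        (PI.reverse.filter (fun x => (PySem.Str.replace x "-" "2") == k)).head? from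
        pvFind?_eq_head?_filter _ _]
    rw [List.filter_reverse, List.head?_reverse]
    rcases (PI.filter (fun x => (PySem.Str.replace x "-" "2") == k)).getLast? with _ | x
    · exact PySem.Dict.get?_empty k
    · rfl
  have hmem : ∀ p : String × String, p ∈ pvRunsLast L ↔ p ∈ d.items := by
    rintro ⟨k, v⟩
    rw [pvRunsLast_mem_iff hLpair k v, hstab k]
    rw [← PySem.Dict.get?_eq_some_iff_mem_items d k v hkeysNodup, hget k]
    have hfm : pairs.filter (fun p => p.1 == k) =
        (PI.filter (fun x => (PySem.Str.replace x "-" "2") == k)).map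
          (fun x => ((PySem.Str.replace x "-" "2"), x)) := by
      rw [hpairs, List.filter_map]
      rfl
    rw [hfm, List.getLast?_map]
    rcases hg : (PI.filter (fun x => (PySem.Str.replace x "-" "2") == k)).getLast? with _ | x
    · simp
    · have hx : (PySem.Str.replace x "-" "2") = k := by
        simpa using (List.mem_filter.mp (List.mem_of_getLast? hg)).2
      simp only [Option.map_some, Option.some.injEq, Prod.mk.injEq]
      constructor
      · rintro ⟨h1, h2⟩; rw [h2]
      · rintro h1; exact ⟨hx, by simpa using h1⟩
  -- runsLast L is the sorted arrangement of d.items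
  have hperm : (pvRunsLast L).Perm d.items :=
    (List.perm_ext_iff_of_nodup (pvNodup_runsLast hLpair) hitemsNodup).mpr hmem
  have hsorted1 : PySem.List.sorted d.items (fun p : String × String => p.1) = pvRunsLast L :=
    PySem.List.sorted_eq_of_perm_of_pairwise_lt d.items (pvRunsLast L) (fun p => p.1)
      hperm (pvRunsLast_pairwise hLpair)
  -- sorted2 on items with distinct first components is sorted by the first component
  have hsorted2 : PySem.List.sorted2 d.items (fun p : String × String => p.1)
      (fun p => p.2) false = PySem.List.sorted d.items (fun p : String × String => p.1) false := by
    rw [PySem.List.sorted_eq_foldl_insertBy]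
    show List.foldl (fun acc x => PySem.List.insertBy _ x acc) [] d.items = _
    apply pvFoldl_insertBy_congr
    · intro x hx b hb; simp at hb
    · intro x hx y hy
      by_cases hxy : x = y
      · subst hxy
        simp
      · have hne : x.1 ≠ y.1 := fun he => hxy (List.inj_on_of_nodup_map hitemsFstNodup hx hy he)
        by_cases hlt : x.1 < y.1
        · simp [hlt]
        · have : y.1 < x.1 := lt_of_le_of_ne (le_of_not_gt hlt) (Ne.symm hne)
          simp [hlt, this]
  -- assemble
    -- A's output
  show (PySem.List.sorted2 d.items (fun p => p.1) (fun p => p.2) false).foldl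
      (fun result i => result ++ [i.2]) [] = pvKeepLast L
  rw [pvFoldl_append, hsorted2, hsorted1, pvKeepLast_eq_map]
  simp

-- ===== VERDICT (by name: the statement is the Claim_ definition above) =====
theorem PI_sort_spec : Claim_equal_PI_sort := by
  intro PI _
  exact pvMain PI
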